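-- pv_equiv track=rewrite | github.com/Marcelo-Feliz/Licenciatura-EI. | Programação I/Python/Trabalho de P1/2Parte/gerar_sopaletras.py | transformar_letra
-- ===== SOURCE A (Python) =====
-- def transformar_letra(sopa_letras,coordenada,letra):
-- 	for i,linha in enumerate(sopa_letras):
-- 		if i+1 == coordenada[0]:
-- 			for l,coluna in enumerate(linha[0]):
-- 				if l+1 == coordenada[1]:
-- 					#letter3 = linha[0].replace(linha[0][l],letra,1)
-- 					letter3 = linha[0][:l] + letra + linha[0][l+1:]
-- 					sopa_letras[i] = [letter3]
-- 	return sopa_letras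
-- ===== SOURCE B (Python) =====
-- def transformar_letra(sopa_letras, coordenada, letra):
--     # Direct indexing instead of scanning every row and every character.
--     r = coordenada[0] - 1
--     c = coordenada[1] - 1
--     if 0 <= r < len(sopa_letras):
--         s = sopa_letras[r][0]
--         if 0 <= c < len(s):
--             sopa_letras[r] = [s[:c] + letra + s[c+1:]]
--     return sopa_letras
-- ===== Notes on version B (the rewrite author's own statement) =====
-- stated objective: simpler
-- what changed: Replaces the two nested enumerate loops (scan every row, then every character of the matched row) with direct index arithmetic: r=coordenada[0]-1, c=coordenada[1]-1, bounds-checked, rebuilding the one row by slicing.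
import Mathlib
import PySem

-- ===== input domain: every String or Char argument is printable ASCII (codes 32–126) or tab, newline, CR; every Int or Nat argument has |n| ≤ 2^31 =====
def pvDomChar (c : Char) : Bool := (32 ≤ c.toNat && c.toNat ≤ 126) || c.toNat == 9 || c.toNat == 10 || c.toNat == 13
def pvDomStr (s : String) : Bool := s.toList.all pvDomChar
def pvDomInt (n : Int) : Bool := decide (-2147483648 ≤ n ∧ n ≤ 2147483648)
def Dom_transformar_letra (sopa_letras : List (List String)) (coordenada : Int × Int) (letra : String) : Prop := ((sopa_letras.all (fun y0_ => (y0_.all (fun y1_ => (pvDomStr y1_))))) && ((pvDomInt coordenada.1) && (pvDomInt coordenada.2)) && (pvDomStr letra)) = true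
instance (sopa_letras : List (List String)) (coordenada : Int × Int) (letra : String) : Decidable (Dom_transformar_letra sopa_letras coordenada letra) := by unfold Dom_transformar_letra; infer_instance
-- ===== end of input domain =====

-- B replaces A's two nested scans by direct index arithmetic on the coordinate (objective: simpler).
-- A mutates sopa_letras in place (B performs the same mutation); the equivalence proved here is about the return value.

-- ===== PORT A =====
-- inner loop: 'for l,coluna in enumerate(linha[0]): if l+1 == coordenada[1]: ... sopa_letras[i] = [letter3]'
def pvA_inner (acc : List (List String)) (i : Nat) (s : String) (c2 : Int) (letra : String)
    (l : Nat) (chars : List Char) : List (List String) :=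
  match chars with
  | [] => acc
  | _ :: rest =>
    let acc' :=
      if (l : Int) + 1 = c2 then
        acc.set i [PySem.Str.slice s none (some (l : Int)) ++ letra ++
                   PySem.Str.slice s (some ((l : Int) + 1)) none]
      else acc
    pvA_inner acc' i s c2 letra (l + 1) rest

-- outer loop: 'for i,linha in enumerate(sopa_letras): if i+1 == coordenada[0]: ...'
-- (at most one row index matches, so iterating over the original list with an accumulator is faithful
-- to Python's in-place mutation: mutated entries lie strictly before the iterator)
def pvA_outer (acc : List (List String)) (coordenada : Int × Int) (letra : String)
    (i : Nat) (rows : List (List String)) : List (List String) :=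
  match rows with
  | [] => acc
  | linha :: rest =>
    let acc' :=
      if (i : Int) + 1 = coordenada.1 then
        match PySem.List.pyGet? linha 0 with
        | some s => pvA_inner acc i s coordenada.2 letra 0 s.toList
        | none => acc   -- Python raises IndexError here (linha == []); excluded by Pre_
      else acc
    pvA_outer acc' coordenada letra (i + 1) rest

def transformar_letra (sopa_letras : List (List String)) (coordenada : Int × Int) (letra : String) : List (List String) :=
  pvA_outer sopa_letras coordenada letra 0 sopa_letras

-- ===== PORT B =====
def transformar_letra_alt (sopa_letras : List (List String)) (coordenada : Int × Int) (letra : String) : List (List String) :=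
  let r := coordenada.1 - 1
  let c := coordenada.2 - 1
  if 0 ≤ r ∧ r < (sopa_letras.length : Int) then
    match PySem.List.pyGet? sopa_letras r with
    | none => sopa_letras   -- unreachable: 0 ≤ r < len
    | some linha =>
      match PySem.List.pyGet? linha 0 with
      | none => sopa_letras -- Python raises IndexError here (linha == []); excluded by Pre_
      | some s =>
        if 0 ≤ c ∧ c < (s.toList.length : Int) then
          sopa_letras.set r.toNat
            [PySem.Str.slice s none (some c) ++ letra ++
             PySem.Str.slice s (some (c + 1)) none]
        else sopa_letras
  else sopa_letras

-- ===== PRECONDITION & SPEC =====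
-- Pre_ excludes exactly the inputs on which Python A raises IndexError: the row addressed by an
-- in-range coordenada[0] being the empty list (linha[0] then fails); B raises there too.
def Pre_transformar_letra (sopa_letras : List (List String)) (coordenada : Int × Int) (letra : String) : Prop :=
  (1 ≤ coordenada.1 ∧ coordenada.1 ≤ (sopa_letras.length : Int)) →
    sopa_letras.getD (coordenada.1 - 1).toNat [] ≠ []
instance (sopa_letras : List (List String)) (coordenada : Int × Int) (letra : String) : Decidable (Pre_transformar_letra sopa_letras coordenada letra) := by unfold Pre_transformar_letra; infer_instance

def pvWitness_transformar_letra : List (List String) × (Int × Int) × String :=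
  ([["abc"], ["def"]], (2, 3), "X")

def Spec_transformar_letra (sopa_letras : List (List String)) (coordenada : Int × Int) (letra : String) (out : List (List String)) : Prop := out = transformar_letra_alt sopa_letras coordenada letra
instance (sopa_letras : List (List String)) (coordenada : Int × Int) (letra : String) (out : List (List String)) : Decidable (Spec_transformar_letra sopa_letras coordenada letra out) := by unfold Spec_transformar_letra; infer_instance

-- ===== CLAIM (what is proved, stated in full; the proofs are below) =====
def Claim_equal_transformar_letra : Prop := ∀ (sopa_letras : List (List String)) (coordenada : Int × Int) (letra : String), Dom_transformar_letra sopa_letras coordenada letra → Pre_transformar_letra sopa_letras coordenada letra → Spec_transformar_letra sopa_letras coordenada letra (transformar_letra sopa_letras coordenada letra)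

-- ===== LEMMAS AND PROOFS =====

-- characterisation of A's inner loop
theorem pvA_inner_eq (acc : List (List String)) (i : Nat) (s : String) (c2 : Int) (letra : String)
    (l : Nat) (chars : List Char) :
    pvA_inner acc i s c2 letra l chars =
      if (l : Int) < c2 ∧ c2 ≤ (l : Int) + chars.length then
        acc.set i [PySem.Str.slice s none (some (c2 - 1)) ++ letra ++
                   PySem.Str.slice s (some c2) none]
      else acc := by
  induction chars generalizing l acc with
  | nil => simp [pvA_inner]
  | cons a rest ih =>
    simp only [pvA_inner]
    by_cases h : (l : Int) + 1 = c2
    · rw [ih, if_pos h, if_neg (by push_cast; omega), if_pos (by simp; omega)]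
      have h1 : c2 - 1 = (l : Int) := by omega
      rw [h1, ← h]
    · rw [ih, if_neg h]
      have hiff : (((l : Nat) + 1 : Nat) : Int) < c2 ∧ c2 ≤ (((l : Nat) + 1 : Nat) : Int) + (rest.length : Int) ↔
          (l : Int) < c2 ∧ c2 ≤ (l : Int) + ((a :: rest).length : Int) := by simp; omega
      rw [if_congr hiff rfl rfl]

-- characterisation of A's outer loop
theorem pvA_outer_eq (coordenada : Int × Int) (letra : String)
    (rows : List (List String)) (acc : List (List String)) (i : Nat) :
    pvA_outer acc coordenada letra i rows =
      if h : (i : Int) < coordenada.1 ∧ coordenada.1 ≤ (i : Int) + rows.length then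
        match PySem.List.pyGet? (rows.getD (coordenada.1 - 1 - i).toNat []) 0 with
        | some s => pvA_inner acc (coordenada.1 - 1).toNat s coordenada.2 letra 0 s.toList
        | none => acc
      else acc := by
  induction rows generalizing i acc with
  | nil => simp [pvA_outer]
  | cons linha rest ih =>
    simp only [pvA_outer]
    by_cases h : (i : Int) + 1 = coordenada.1
    · have hidx : (coordenada.1 - 1 - (i : Int)).toNat = 0 := by omega
      have hi : (coordenada.1 - 1).toNat = i := by omega
      rw [if_pos h, ih]
      have hcond : (i : Int) < coordenada.1 ∧ coordenada.1 ≤ (i : Int) + (linha :: rest).length := by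
        simp; omega
      rw [dif_pos hcond]
      have hnot : ¬ (((i : Nat) + 1 : Int) < coordenada.1 ∧
                     coordenada.1 ≤ ((i : Nat) + 1 : Int) + rest.length) := by push_cast; omega
      rw [dif_neg (by push_cast at hnot ⊢; omega)]
      simp only [hidx, List.getD_cons_zero, hi]
    · rw [if_neg h, ih]
      by_cases h2 : ((i : Int) + 1 < coordenada.1 ∧ coordenada.1 ≤ ((i : Int) + 1) + rest.length)
      · have hcond : (i : Int) < coordenada.1 ∧ coordenada.1 ≤ (i : Int) + (linha :: rest).length := by
          simp; omega
        rw [dif_pos (by push_cast; omega), dif_pos hcond]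
        have hidx : (coordenada.1 - 1 - (i : Int)).toNat = (coordenada.1 - 1 - ((i : Nat) + 1 : Int)).toNat + 1 := by
          omega
        rw [hidx]
        simp only [List.getD_cons_succ]
        norm_num
      · have hcond : ¬ ((i : Int) < coordenada.1 ∧ coordenada.1 ≤ (i : Int) + (linha :: rest).length) := by
          simp at h2 ⊢; omega
        rw [dif_neg (by push_cast at h2 ⊢; omega), dif_neg hcond]

theorem transformar_letra_eq_alt (sopa_letras : List (List String)) (coordenada : Int × Int) (letra : String) :
    transformar_letra sopa_letras coordenada letra = transformar_letra_alt sopa_letras coordenada letra := by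
  unfold transformar_letra transformar_letra_alt
  rw [pvA_outer_eq]
  simp only [Nat.cast_zero, zero_add, Int.sub_zero]
  by_cases hr : 0 < coordenada.1 ∧ coordenada.1 ≤ (sopa_letras.length : Int)
  · rw [dif_pos hr, if_pos (by omega)]
    have hlt : (coordenada.1 - 1).toNat < sopa_letras.length := by omega
    have hget : PySem.List.pyGet? sopa_letras (coordenada.1 - 1) =
        some (sopa_letras[(coordenada.1 - 1).toNat]) := by
      rw [PySem.List.pyGet?_of_nonneg _ (by omega)]
      exact List.getElem?_eq_getElem hlt
    rw [hget]
    have hgetD : sopa_letras.getD (coordenada.1 - 1).toNat [] =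
        sopa_letras[(coordenada.1 - 1).toNat] := List.getD_eq_getElem _ _ hlt
    rw [hgetD]
    cases hl : PySem.List.pyGet? (sopa_letras[(coordenada.1 - 1).toNat]) 0 with
    | none => simp only [hl]
    | some s =>
      simp only [hl, pvA_inner_eq]
      by_cases hc : 0 < coordenada.2 ∧ coordenada.2 ≤ (s.toList.length : Int)
      · rw [if_pos (by push_cast; omega), if_pos (by omega)]
        have h2 : coordenada.2 - 1 + 1 = coordenada.2 := by omega
        rw [h2]
      · rw [if_neg (by push_cast; omega), if_neg (by omega)]
  · rw [dif_neg (by omega), if_neg (by omega)]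

-- ===== VERDICT (by name: the statement is the Claim_ definition above) =====
theorem transformar_letra_spec : Claim_equal_transformar_letra := by
  intro sopa coordenada letra _ _
  unfold Spec_transformar_letra
  exact transformar_letra_eq_alt sopa coordenada letra
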